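-- pv_equiv track=rewrite | github.com/alezanper/Python-DataStructures-Algorithms | algorithms/arrays/min_groups_2.py | mingroupsroups
-- ===== SOURCE A (Python) =====
-- def mingroupsroups(arr, max):
--
--     arr.sort()
--
--     k = len(arr)
--     groups = 0
--     while(k > 0):
--
--         while(True):
--             k = len(arr)
--
--             if (k==1):
--                 groups += 1
--                 return groups
--
--             if(abs(arr[0]-arr[1])<=max):
--                 del(arr[1])
--             else:
--                 del(arr[0])
--                 break
--
--         groups += 1
--     return groups
-- ===== SOURCE B (Python) =====
-- def mingroupsroups(arr, max):
--     # One linear pass over the sorted values: start a new group whenever the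
--     # value exceeds the current group's anchor (its minimum) by more than max.
--     arr.sort()
--     if not arr:
--         return 0
--     groups = 1
--     anchor = arr[0]
--     for x in arr[1:]:
--         if x - anchor > max:
--             groups += 1
--             anchor = x
--     return groups
-- ===== Notes on version B (the rewrite author's own statement) =====
-- stated objective: faster
-- what changed: Replaced A's nested while loops that repeatedly delete arr[0]/arr[1] from the front of the list with a single linear scan of the sorted list keeping a group anchor.
import Mathlib
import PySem

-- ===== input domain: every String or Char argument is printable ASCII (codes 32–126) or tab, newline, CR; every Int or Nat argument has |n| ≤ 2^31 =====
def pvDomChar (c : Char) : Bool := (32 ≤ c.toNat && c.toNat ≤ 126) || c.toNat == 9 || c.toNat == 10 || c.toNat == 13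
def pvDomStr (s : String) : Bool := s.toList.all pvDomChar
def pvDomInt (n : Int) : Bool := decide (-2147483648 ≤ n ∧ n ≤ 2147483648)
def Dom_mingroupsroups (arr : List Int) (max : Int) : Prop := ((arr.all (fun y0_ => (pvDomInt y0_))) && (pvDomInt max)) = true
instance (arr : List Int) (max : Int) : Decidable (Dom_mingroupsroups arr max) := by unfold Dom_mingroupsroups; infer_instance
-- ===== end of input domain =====

-- B replaces A's quadratic delete-from-the-front double loop by one linear scan of the
-- sorted list (return value only: A empties the caller's list in place, B just sorts it).

-- ===== PORT A =====
-- A's nested while loops over the mutated list: the inner loop either deletes arr[1]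
-- (same group) or deletes arr[0] and breaks (new group, counted); k==1 returns groups+1;
-- an initially empty list never enters the outer loop (the [] case below).
def loopA (max : Int) : List Int → Int → Int
  | [], g => g
  | [_], g => g + 1
  | a :: b :: rest, g =>
      if |a - b| ≤ max then loopA max (a :: rest) g
      else loopA max (b :: rest) (g + 1)
  termination_by arr => arr.length
  decreasing_by all_goals simp

def mingroupsroups (arr : List Int) (max : Int) : Int :=
  loopA max (PySem.List.sorted arr (fun x => x) false) 0

-- ===== PORT B =====
def loopB (max : Int) : List Int → Int → Int → Int
  | [], _, g => g
  | x :: rest, anchor, g =>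
      if x - anchor > max then loopB max rest x (g + 1)
      else loopB max rest anchor g

def mingroupsroups_alt (arr : List Int) (max : Int) : Int :=
  match PySem.List.sorted arr (fun x => x) false with
  | [] => 0
  | a :: rest => loopB max rest a 1

-- ===== PRECONDITION & SPEC =====
def Spec_mingroupsroups (arr : List Int) (max : Int) (out : Int) : Prop := out = mingroupsroups_alt arr max
instance (arr : List Int) (max : Int) (out : Int) : Decidable (Spec_mingroupsroups arr max out) := by unfold Spec_mingroupsroups; infer_instance

-- ===== CLAIM (what is proved, stated in full; the proofs are below) =====
def Claim_equal_mingroupsroups : Prop := ∀ (arr : List Int) (max : Int), Dom_mingroupsroups arr max → Spec_mingroupsroups arr max (mingroupsroups arr max)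

-- ===== LEMMAS AND PROOFS =====

-- On a sorted (pairwise ≤) list, A's loop with head anchor equals B's scan.
theorem loopA_eq_loopB (max : Int) :
    ∀ (rest : List Int) (a g : Int), (a :: rest).Pairwise (· ≤ ·) →
      loopA max (a :: rest) g = loopB max rest a (g + 1) := by
  intro rest
  induction rest with
  | nil => intro a g _; simp [loopA, loopB]
  | cons b rest ih =>
      intro a g hp
      have hab : a ≤ b := (List.pairwise_cons.mp hp).1 b (by simp)
      rcases List.pairwise_cons.mp hp with ⟨ha, hbp⟩
      by_cases h : b - a ≤ max
      · have habs : |a - b| ≤ max := by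
          rw [abs_sub_comm, abs_of_nonneg (by omega)]; exact h
        rw [loopA, if_pos habs, loopB, if_neg (by omega)]
        exact ih a g (List.pairwise_cons.mpr ⟨fun x hx => ha x (by simp [hx]),
          (List.pairwise_cons.mp hbp).2⟩)
      · have habs : ¬ |a - b| ≤ max := by
          rw [abs_sub_comm, abs_of_nonneg (by omega)]; exact h
        rw [loopA, if_neg habs, loopB, if_pos (by omega)]
        exact ih b (g + 1) hbp

-- ===== VERDICT (by name: the statement is the Claim_ definition above) =====
theorem mingroupsroups_spec : Claim_equal_mingroupsroups := by
  intro arr max _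
  unfold Spec_mingroupsroups mingroupsroups mingroupsroups_alt
  have hp := PySem.List.sorted_pairwise (xs := arr) (key := fun x => x)
  cases hs : PySem.List.sorted arr (fun x => x) false with
  | nil => simp [loopA]
  | cons a rest =>
      rw [hs] at hp
      have := loopA_eq_loopB max rest a 0 hp
      simpa using this
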